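-- pv_equiv track=rewrite | github.com/brandonmpace/snmpvlantrunk | snmpvlantrunk.py | group_for_vlan
-- ===== SOURCE A (Python) =====
-- MIN_VLAN = 1
--
-- MAX_VLAN = 4094
--
-- VLAN_GROUP_SIZE = 1024
--
-- def group_for_vlan(vlan_id: int) -> int:
--     """Get the group the VLAN falls under based on the VLAN_GROUP_SIZE"""
--     validate_vlan(vlan_id)
--
--     group = 0
--     test_value = vlan_id
--
--     while test_value > VLAN_GROUP_SIZE:
--         group += 1
--         test_value -= VLAN_GROUP_SIZE
--
--     return group
--
-- def validate_vlan(vlan_id: int, safe: bool = False) -> bool: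
--     """Confirm that a VLAN ID is within the allowed range"""
--     if (vlan_id >= MIN_VLAN) and (vlan_id <= MAX_VLAN):
--         return True
--     elif safe:
--         return False
--     else:
--         raise ValueError(f"Unexpected value for vlan_id: {vlan_id}")
-- ===== SOURCE B (Python) =====
-- MIN_VLAN = 1
-- MAX_VLAN = 4094
-- VLAN_GROUP_SIZE = 1024
--
--
-- def validate_vlan(vlan_id: int, safe: bool = False) -> bool:
--     """Confirm that a VLAN ID is within the allowed range"""
--     if (vlan_id >= MIN_VLAN) and (vlan_id <= MAX_VLAN):
--         return True
--     elif safe: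
--         return False
--     else:
--         raise ValueError(f"Unexpected value for vlan_id: {vlan_id}")
--
--
-- def group_for_vlan(vlan_id: int) -> int:
--     """Get the group the VLAN falls under based on the VLAN_GROUP_SIZE"""
--     validate_vlan(vlan_id)
--     return (vlan_id - 1) // VLAN_GROUP_SIZE
-- ===== Notes on version B (the rewrite author's own statement) =====
-- stated objective: simpler
-- what changed: Replaces the repeated-subtraction while loop with the closed-form floor division (vlan_id - 1) // VLAN_GROUP_SIZE, keeping the validate_vlan call so the out-of-range ValueError is preserved.
import Mathlib
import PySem

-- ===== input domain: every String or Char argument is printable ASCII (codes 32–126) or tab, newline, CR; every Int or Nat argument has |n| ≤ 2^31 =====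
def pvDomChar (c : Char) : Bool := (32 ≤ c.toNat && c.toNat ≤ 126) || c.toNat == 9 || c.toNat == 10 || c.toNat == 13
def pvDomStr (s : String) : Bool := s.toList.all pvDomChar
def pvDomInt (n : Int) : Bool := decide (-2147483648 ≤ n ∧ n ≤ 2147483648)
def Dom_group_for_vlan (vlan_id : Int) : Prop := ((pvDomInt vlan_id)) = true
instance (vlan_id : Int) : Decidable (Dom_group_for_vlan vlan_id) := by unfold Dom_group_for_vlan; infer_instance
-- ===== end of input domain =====

-- one-line: B replaces A's repeated-subtraction loop with the closed form (vlan_id - 1) // 1024 (simpler)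


-- ===== PORT A =====
-- the while loop: while test_value > 1024: group += 1; test_value -= 1024
def groupLoopA (group : Int) (test_value : Int) : Int :=
  if h : test_value > 1024 then groupLoopA (group + 1) (test_value - 1024) else group
termination_by test_value.toNat
decreasing_by omega

def group_for_vlan (vlan_id : Int) : Int :=
  -- validate_vlan raises outside [1, 4094]; those inputs are excluded by Pre_
  groupLoopA 0 vlan_id

-- ===== PORT B =====
def group_for_vlan_alt (vlan_id : Int) : Int :=
  PySem.Int.floordiv (vlan_id - 1) 1024

-- ===== PRECONDITION & SPEC =====
-- Pre_ excludes exactly the inputs where validate_vlan raises ValueError (vlan_id outside [1, 4094])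
def Pre_group_for_vlan (vlan_id : Int) : Prop := 1 ≤ vlan_id ∧ vlan_id ≤ 4094
instance (vlan_id : Int) : Decidable (Pre_group_for_vlan vlan_id) := by unfold Pre_group_for_vlan; infer_instance
def pvWitness_group_for_vlan : Int := (1025)

def Spec_group_for_vlan (vlan_id : Int) (out : Int) : Prop := out = group_for_vlan_alt vlan_id
instance (vlan_id : Int) (out : Int) : Decidable (Spec_group_for_vlan vlan_id out) := by unfold Spec_group_for_vlan; infer_instance

-- ===== CLAIM (what is proved, stated in full; the proofs are below) =====
def Claim_equal_group_for_vlan : Prop := ∀ (vlan_id : Int), Dom_group_for_vlan vlan_id → Pre_group_for_vlan vlan_id → Spec_group_for_vlan vlan_id (group_for_vlan vlan_id)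

-- ===== LEMMAS AND PROOFS =====
-- loop invariant: for positive test_value, the loop adds (test_value - 1) // 1024 to group
theorem groupLoopA_eq (test_value : Int) (ht : 1 ≤ test_value) :
    ∀ group : Int, groupLoopA group test_value = group + (test_value - 1) / 1024 := by
  induction hn : test_value.toNat using Nat.strong_induction_on generalizing test_value with
  | _ n ih =>
      intro group
      rw [groupLoopA]
      split_ifs with h
      · have h1 : 1 ≤ test_value - 1024 := by omega
        have := ih (test_value - 1024).toNat (by omega) (test_value - 1024) h1 rfl (group + 1)
        rw [this]
        have : (test_value - 1024 - 1) / 1024 = (test_value - 1) / 1024 - 1 := by omega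
        rw [this]; ring
      · have h0 : 0 ≤ test_value - 1 := by omega
        have hlt : test_value - 1 < 1024 := by omega
        rw [Int.ediv_eq_zero_of_lt h0 hlt]; ring

-- ===== VERDICT (by name: the statement is the Claim_ definition above) =====
theorem group_for_vlan_spec : Claim_equal_group_for_vlan := by
  intro v _ hpre
  unfold Spec_group_for_vlan group_for_vlan group_for_vlan_alt
  rw [PySem.Int.floordiv_eq_ediv_of_pos (by norm_num), groupLoopA_eq v hpre.1 0]
  ring
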